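-- pv_equiv track=rewrite | github.com/MartinThoma/hwrt | hwrt/latex.py | chunks_to_string
-- ===== SOURCE A (Python) =====
-- def chunks_to_string(chunks):
--     """
--     Parameters
--     ----------
--     chunks : list of strings
--         A list of single entities in order
--
--     Returns
--     -------
--     string :
--         A LaTeX-parsable string
--
--     Examples
--     --------
--     >>> chunks_to_string(['\\\\sum', '_', 'i', '^', 'n', 'i', '^', '2'])
--     '\\\\sum_{i}^{n}i^{2}'
--     >>> chunks_to_string(['\\\\sum', '_', '{', 'i', '}', '^', 'n', 'i', '^',
--     ...                   '2'])
--     '\\\\sum_{i}^{n}i^{2}'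
--     """
--     string = ''
--     began_context = False
--     context_depth = 0
--     context_triggers = ['_', '^']
--     for chunk in chunks:
--         if began_context and chunk != '{':
--             string += '{' + chunk + '}'
--             began_context = False
--         elif began_context and chunk == '{':
--             began_context = False
--             string += chunk
--         else:
--             if chunk in context_triggers:
--                 began_context = True
--                 context_depth += 1
--             string += chunk
--     return string
-- ===== SOURCE B (Python) =====
-- def chunks_to_string(chunks):
--     pieces = []
--     i = 0
--     n = len(chunks)
--     while i < n:
--         c = chunks[i]
--         if c in ('_', '^') and i + 1 < n:
--             nxt = chunks[i + 1]
--             pieces.append(c)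
--             pieces.append(nxt if nxt == '{' else '{' + nxt + '}')
--             i += 2
--         else:
--             pieces.append(c)
--             i += 1
--     return ''.join(pieces)
-- ===== Notes on version B (the rewrite author's own statement) =====
-- stated objective: alternative
-- what changed: Replaces A's per-iteration began_context state flag with an index loop that consumes a '_'/'^' trigger together with its following argument in one lookahead step, collecting pieces into a list joined once at the end.
import Mathlib
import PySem

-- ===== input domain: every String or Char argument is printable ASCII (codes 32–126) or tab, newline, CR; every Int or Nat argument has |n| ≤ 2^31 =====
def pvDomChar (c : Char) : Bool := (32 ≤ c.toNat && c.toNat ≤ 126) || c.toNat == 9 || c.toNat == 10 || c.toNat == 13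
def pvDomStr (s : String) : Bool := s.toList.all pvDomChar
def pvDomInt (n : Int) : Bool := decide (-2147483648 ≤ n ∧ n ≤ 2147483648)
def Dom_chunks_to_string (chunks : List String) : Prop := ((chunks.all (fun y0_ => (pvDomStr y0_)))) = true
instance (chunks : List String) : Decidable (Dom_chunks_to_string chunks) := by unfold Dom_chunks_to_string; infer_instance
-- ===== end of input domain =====

-- B replaces A's per-chunk `began_context` state flag by a lookahead loop that consumes a
-- trigger ('_'/'^') together with its argument in one step and joins the pieces at the end
-- (objective: alternative decomposition, same cost).

-- ===== PORT A =====
-- state = (string, began_context, context_depth), exactly A's loop body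
def ctsStep (st : String × Bool × Int) (chunk : String) : String × Bool × Int :=
  if st.2.1 = true ∧ chunk ≠ "{" then (st.1 ++ "{" ++ chunk ++ "}", false, st.2.2)
  else if st.2.1 = true ∧ chunk = "{" then (st.1 ++ chunk, false, st.2.2)
  else if chunk = "_" ∨ chunk = "^" then (st.1 ++ chunk, true, st.2.2 + 1)
  else (st.1 ++ chunk, false, st.2.2)

def chunks_to_string (chunks : List String) : String :=
  (chunks.foldl ctsStep ("", false, 0)).1

-- ===== PORT B =====
-- the `pieces` list built by Source B's while-loop with lookahead
def ctsPieces : List String → List String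
  | [] => []
  | c :: rest =>
    if c = "_" ∨ c = "^" then
      match rest with
      | [] => [c]
      | nxt :: rest' =>
        c :: (if nxt = "{" then nxt else "{" ++ nxt ++ "}") :: ctsPieces rest'
    else c :: ctsPieces rest

def chunks_to_string_alt (chunks : List String) : String :=
  PySem.Str.join "" (ctsPieces chunks)

-- ===== PRECONDITION & SPEC =====
def Spec_chunks_to_string (chunks : List String) (out : String) : Prop := out = chunks_to_string_alt chunks
instance (chunks : List String) (out : String) : Decidable (Spec_chunks_to_string chunks out) := by unfold Spec_chunks_to_string; infer_instance

-- ===== CLAIM (what is proved, stated in full; the proofs are below) =====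
def Claim_equal_chunks_to_string : Prop := ∀ (chunks : List String), Dom_chunks_to_string chunks → Spec_chunks_to_string chunks (chunks_to_string chunks)

-- ===== LEMMAS AND PROOFS =====
theorem join_empty_cons (x : String) (xs : List String) :
    PySem.Str.join "" (x :: xs) = x ++ PySem.Str.join "" xs := by
  cases xs with
  | nil => simp [PySem.Str.join, PySem.Chars.join_singleton, PySem.Chars.join_nil]
  | cons y ys => simp [PySem.Str.join, PySem.Chars.join_cons_cons, String.ofList_append]

theorem join_empty_nil : PySem.Str.join "" ([] : List String) = "" := by
  simp [PySem.Str.join, PySem.Chars.join_nil]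

-- equations of ctsPieces in rewrite form
theorem ctsPieces_nontrig (c : String) (rest : List String) (h : ¬(c = "_" ∨ c = "^")) :
    ctsPieces (c :: rest) = c :: ctsPieces rest := by
  conv_lhs => unfold ctsPieces
  rw [if_neg h]

theorem ctsPieces_trig_nil (c : String) (h : c = "_" ∨ c = "^") :
    ctsPieces [c] = [c] := by
  conv_lhs => unfold ctsPieces
  rw [if_pos h]

theorem ctsPieces_trig_cons (c nxt : String) (rest' : List String) (h : c = "_" ∨ c = "^") :
    ctsPieces (c :: nxt :: rest') =
      c :: (if nxt = "{" then nxt else "{" ++ nxt ++ "}") :: ctsPieces rest' := by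
  conv_lhs => unfold ctsPieces
  rw [if_pos h]

-- loop invariant: from a disarmed state, A's fold appends exactly B's joined pieces
theorem cts_invariant (chunks : List String) :
    ∀ (s : String) (d : Int),
      (chunks.foldl ctsStep (s, false, d)).1 = s ++ PySem.Str.join "" (ctsPieces chunks) := by
  induction chunks using ctsPieces.induct with
  | case1 =>
      intro s d
      simp [ctsPieces, join_empty_nil]
  | case2 c htrig =>
      -- a trigger with no following chunk
      intro s d
      rw [ctsPieces_trig_nil c htrig]
      simp [ctsStep, htrig, join_empty_cons, join_empty_nil]
  | case3 c htrig nxt rest' ih =>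
      -- a trigger followed by its argument
      intro s d
      rw [ctsPieces_trig_cons c nxt rest' htrig]
      by_cases hb : nxt = "{"
      · simp [ctsStep, htrig, hb, ih, join_empty_cons, String.append_assoc]
      · simp [ctsStep, htrig, hb, ih, join_empty_cons, String.append_assoc]
  | case4 c rest htrig ih =>
      -- an ordinary chunk
      intro s d
      rw [ctsPieces_nontrig c rest htrig]
      simp [ctsStep, htrig, ih, join_empty_cons, String.append_assoc]

-- ===== VERDICT (by name: the statement is the Claim_ definition above) =====
theorem chunks_to_string_spec : Claim_equal_chunks_to_string := by
  intro chunks _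
  unfold Spec_chunks_to_string chunks_to_string chunks_to_string_alt
  simpa using cts_invariant chunks "" 0
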